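-- pv_equiv track=rewrite | github.com/Ajpop3y/vibecode-project | src/vibecode/renderers/markdown.py | generate_ascii_tree
-- ===== SOURCE A (Python) =====
-- from typing import List, Tuple, Dict
--
-- def generate_ascii_tree(file_paths: List[str]) -> str:
--     """
--     Generates a directory tree string from a list of file paths.
--     Output mimics the unix 'tree' command.
--     """
--     tree_dict = {}
--     for path in sorted(file_paths):
--         parts = path.replace('\\', '/').split('/')
--         current_level = tree_dict
--         for part in parts:
--             current_level = current_level.setdefault(part, {})
--
--     lines = ["."]
--
--     def _walk(node: Dict, prefix: str):
--         keys = sorted(node.keys())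
--         total = len(keys)
--         for i, key in enumerate(keys):
--             is_last = (i == total - 1)
--             connector = "└── " if is_last else "├── "
--             lines.append(f"{prefix}{connector}{key}")
--             child_prefix = prefix + ("    " if is_last else "│   ")
--             if node[key]:
--                 _walk(node[key], child_prefix)
--
--     _walk(tree_dict, "")
--     return "\n".join(lines)
-- ===== SOURCE B (Python) =====
-- def generate_ascii_tree(file_paths):
--     """
--     Generates a directory tree string from a list of file paths.
--     Output mimics the unix 'tree' command.
--     Alternative algorithm: no global nested-dict trie; recursively partitions
--     the list of split path-part lists, bucketing them by first component with
--     one dict pass per level.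
--     """
--     groups = [p.replace('\\', '/').split('/') for p in file_paths]
--     lines = ["."]
--
--     def walk(groups, prefix):
--         buckets = {}
--         for g in groups:
--             buckets.setdefault(g[0], []).append(g[1:])
--         heads = sorted(buckets)
--         total = len(heads)
--         for i, h in enumerate(heads):
--             is_last = (i == total - 1)
--             lines.append(prefix + ("└── " if is_last else "├── ") + h)
--             tails = [t for t in buckets[h] if t]
--             if tails:
--                 walk(tails, prefix + ("    " if is_last else "│   "))
--
--     walk(groups, "")
--     return "\n".join(lines)
-- ===== Notes on version B (the rewrite author's own statement) =====
-- stated objective: alternative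
-- what changed: B never builds A's nested-dict trie: it splits each path once and renders by recursively partitioning the list of part-lists by first component (sorted distinct heads per level), which is proved to emit the same lines as A's sorted walk of the trie.
import Mathlib
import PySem

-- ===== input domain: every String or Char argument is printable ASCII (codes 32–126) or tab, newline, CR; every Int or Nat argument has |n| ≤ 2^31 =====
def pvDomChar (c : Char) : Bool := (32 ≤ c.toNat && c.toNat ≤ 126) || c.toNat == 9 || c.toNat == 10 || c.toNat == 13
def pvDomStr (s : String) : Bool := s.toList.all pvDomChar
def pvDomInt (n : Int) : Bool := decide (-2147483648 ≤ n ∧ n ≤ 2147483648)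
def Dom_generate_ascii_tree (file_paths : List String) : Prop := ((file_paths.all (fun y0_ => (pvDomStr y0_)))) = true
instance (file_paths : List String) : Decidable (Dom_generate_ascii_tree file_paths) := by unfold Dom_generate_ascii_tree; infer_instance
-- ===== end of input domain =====

-- B renders the tree by recursively partitioning the split path lists by first component,
-- never building A's nested-dict trie (objective: alternative decomposition, same cost).

-- shared by both ports: `path.replace('\\', '/').split('/')` (split? is total here: sep = "/" ≠ "")
def splitParts (p : String) : List String :=
  (PySem.Str.split? (PySem.Str.replace p "\\" "/") "/").getD []

-- ===== PORT A =====
-- A's nested dict of dicts, as a mutual inductive (no nested inductives allowed)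
mutual
inductive PyTrie where
  | node : PyTrieL → PyTrie
  deriving Repr
inductive PyTrieL where
  | nil  : PyTrieL
  | cons : String → PyTrie → PyTrieL → PyTrieL
  deriving Repr
end

-- current_level = current_level.setdefault(part, {}) along the whole parts list
mutual
def insertPath : PyTrie → List String → PyTrie
  | t, [] => t
  | .node cs, p :: ps => .node (insertPathL cs p ps)
termination_by _t ps => (ps.length, 0, 0)
decreasing_by exact Prod.Lex.left _ _ (Nat.lt_succ_self _)
def insertPathL : PyTrieL → String → List String → PyTrieL
  | .nil, p, ps => .cons p (insertPath (.node .nil) ps) .nil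
  | .cons k t rest, p, ps =>
      if k = p then .cons k (insertPath t ps) rest else .cons k t (insertPathL rest p ps)
termination_by cs _p ps => (ps.length, 1, sizeOf cs)
decreasing_by
  all_goals first
    | exact Prod.Lex.right _ (Prod.Lex.left _ _ Nat.zero_lt_one)
    | exact Prod.Lex.right _ (Prod.Lex.right _ (by simp))
end

def keysA : PyTrieL → List String
  | .nil => []
  | .cons k _ rest => k :: keysA rest

def lookupA? : PyTrieL → String → Option PyTrie
  | .nil, _ => none
  | .cons k t rest, p => if k = p then some t else lookupA? rest p

def isEmptyT : PyTrie → Bool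
  | .node .nil => true
  | _ => false

-- termination helper for walkA: a looked-up child is structurally smaller
theorem sizeOf_lookupA? (cs : PyTrieL) (k : String) (t : PyTrie)
    (h : lookupA? cs k = some t) : sizeOf t < sizeOf cs := by
  match cs with
  | .nil => simp [lookupA?] at h
  | .cons k' t' rest =>
      simp [lookupA?] at h
      split at h
      · cases h; simp; omega
      · have := sizeOf_lookupA? rest k t h; simp; omega

mutual
-- _walk(node, prefix): keys = sorted(node.keys()); enumerate with is_last
def walkA (t : PyTrie) (pre : String) : List String :=
  match t with
  | .node cs =>
    let ks := PySem.List.sorted (keysA cs) (fun x => x) false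
    walkKeysA cs ks 0 ks.length pre
termination_by ((sizeOf t : Nat), 1, 0)
decreasing_by exact Prod.Lex.left _ _ (by simp)
def walkKeysA (cs : PyTrieL) (ks : List String) (i total : Nat) (pre : String) : List String :=
  match ks with
  | [] => []
  | k :: rest =>
    let isLast := i == total - 1
    let line := pre ++ (if isLast then "└── " else "├── ") ++ k
    match h : lookupA? cs k with
    | none => line :: walkKeysA cs rest (i + 1) total pre   -- unreachable: k comes from node.keys()
    | some child =>
      line ::
        (if isEmptyT child then [] else walkA child (pre ++ (if isLast then "    " else "│   "))) ++
        walkKeysA cs rest (i + 1) total pre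
termination_by ((sizeOf cs : Nat), 0, ks.length)
decreasing_by
  all_goals first
    | exact Prod.Lex.right _ (Prod.Lex.right _ (Nat.lt_succ_self _))
    | exact Prod.Lex.left _ _ (sizeOf_lookupA? cs k child h)
end

def buildTrie (file_paths : List String) : PyTrie :=
  (PySem.List.sorted file_paths (fun x => x) false).foldl
    (fun t path => insertPath t (splitParts path)) (.node .nil)

def generate_ascii_tree (file_paths : List String) : String :=
  PySem.Str.join "\n" ("." :: walkA (buildTrie file_paths) "")

-- ===== PORT B =====
def sumLen (gss : List (List String)) : Nat := (gss.map List.length).sum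

-- buckets: one dict pass per level; buckets.setdefault(g[0], []).append(g[1:])
def bucketsOf (gss : List (List String)) : PySem.Dict String (List (List String)) :=
  gss.foldl (fun d g => d.modify (g.headD "") [] (fun b => b ++ [g.tail])) PySem.Dict.empty

theorem getD_bucketsOf (gss : List (List String)) (h : String) :
    (bucketsOf gss).getD h [] =
      (gss.filter (fun g => g.headD "" == h)).map (fun g => g.tail) := by
  rw [bucketsOf, ← List.foldl_map (f := fun g : List String => ((g.headD "" : String), g.tail))
        (g := fun d p => PySem.Dict.modify d p.1 [] (fun b => b ++ [p.2]))]
  rw [PySem.Dict.getD_foldl_modify_append]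
  rw [List.filter_map, List.map_map]
  simp [PySem.Dict.getD_empty, Function.comp_def]

-- termination helper for walkB: a non-empty tail list is strictly lighter than its level
theorem sumLen_bucket_le (gss : List (List String)) (h : String) :
    sumLen (((gss.filter (fun g => g.headD "" == h)).map (fun g => g.tail)).filter
        (fun t => !t.isEmpty)) ≤ sumLen gss := by
  induction gss with
  | nil => exact Nat.le_refl _
  | cons g rest ih =>
      rw [List.filter_cons]
      by_cases hq : (g.headD "" == h) = true
      · rw [if_pos hq, List.map_cons, List.filter_cons]
        by_cases hr : (!g.tail.isEmpty) = true
        · rw [if_pos hr]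
          have : g.tail.length ≤ g.length := by cases g <;> simp
          simp only [sumLen, List.map_cons, List.sum_cons] at ih ⊢
          omega
        · rw [if_neg hr]
          simp only [sumLen, List.map_cons, List.sum_cons] at ih ⊢
          omega
      · rw [if_neg hq]
        simp only [sumLen, List.map_cons, List.sum_cons] at ih ⊢
        omega

theorem sumLen_bucket_lt (gss : List (List String)) (h : String)
    (hne : ((bucketsOf gss).getD h []).filter (fun t => !t.isEmpty) ≠ []) :
    sumLen (((bucketsOf gss).getD h []).filter (fun t => !t.isEmpty)) < sumLen gss := by
  rw [getD_bucketsOf] at hne ⊢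
  induction gss with
  | nil => simp at hne
  | cons g rest ih =>
      rw [List.filter_cons] at hne ⊢
      by_cases hq : (g.headD "" == h) = true
      · rw [if_pos hq, List.map_cons, List.filter_cons] at hne ⊢
        by_cases hr : (!g.tail.isEmpty) = true
        · rw [if_pos hr] at hne ⊢
          have h1 : g.tail.length < g.length := by
            match g, hr with
            | a :: b :: t, _ => simp
            | [a], hr => simp at hr
            | [], hr => simp at hr
          have h2 := sumLen_bucket_le rest h
          simp only [sumLen, List.map_cons, List.sum_cons] at h2 ⊢
          omega
        · rw [if_neg hr] at hne ⊢
          have := ih hne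
          simp only [sumLen, List.map_cons, List.sum_cons] at this ⊢
          omega
      · rw [if_neg hq] at hne ⊢
        have := ih hne
        simp only [sumLen, List.map_cons, List.sum_cons] at this ⊢
        omega

mutual
def walkB (gss : List (List String)) (pre : String) : List String :=
  -- heads = sorted(buckets)
  let hs := PySem.List.sorted (bucketsOf gss).keys (fun x => x) false
  walkHeadsB gss hs 0 hs.length pre
termination_by (sumLen gss, 1, 0)
decreasing_by exact Prod.Lex.right _ (Prod.Lex.left _ _ Nat.zero_lt_one)
def walkHeadsB (gss : List (List String)) (hs : List String) (i total : Nat) (pre : String) :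
    List String :=
  match hs with
  | [] => []
  | h :: rest =>
    let isLast := i == total - 1
    let line := pre ++ (if isLast then "└── " else "├── ") ++ h
    -- tails = [t for t in buckets[h] if t]; buckets[h] is recomputed from the in-scope
    -- groups (same value as Python's buckets dict, which Python keeps in the loop's scope)
    let ts := ((bucketsOf gss).getD h []).filter (fun t => !t.isEmpty)
    line ::
      (if hts : ts = [] then [] else walkB ts (pre ++ (if isLast then "    " else "│   "))) ++
      walkHeadsB gss rest (i + 1) total pre
termination_by (sumLen gss, 0, hs.length)
decreasing_by
  all_goals first
    | exact Prod.Lex.right _ (Prod.Lex.right _ (Nat.lt_succ_self _))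
    | exact Prod.Lex.left _ _ (sumLen_bucket_lt gss h hts)
end

def generate_ascii_tree_alt (file_paths : List String) : String :=
  PySem.Str.join "\n" ("." :: walkB (file_paths.map splitParts) "")

-- ===== PRECONDITION & SPEC =====
def Spec_generate_ascii_tree (file_paths : List String) (out : String) : Prop := out = generate_ascii_tree_alt file_paths
instance (file_paths : List String) (out : String) : Decidable (Spec_generate_ascii_tree file_paths out) := by unfold Spec_generate_ascii_tree; infer_instance

-- ===== CLAIM (what is proved, stated in full; the proofs are below) =====
def Claim_equal_generate_ascii_tree : Prop := ∀ (file_paths : List String), Dom_generate_ascii_tree file_paths → Spec_generate_ascii_tree file_paths (generate_ascii_tree file_paths)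

-- ===== LEMMAS AND PROOFS =====

def tailsB (gss : List (List String)) (h : String) : List (List String) :=
  gss.filterMap (fun g => match g with
    | a :: b :: t => if a = h then some (b :: t) else none
    | _ => none)

theorem bucket_filter_eq_tailsB (gss : List (List String)) (h : String) :
    ((bucketsOf gss).getD h []).filter (fun t => !t.isEmpty) = tailsB gss h := by
  rw [getD_bucketsOf]
  induction gss with
  | nil => rfl
  | cons g rest ih =>
      match g with
      | [] =>
          rw [List.filter_cons]
          by_cases h0 : (([] : List String).headD "" == h) = true
          · rw [if_pos h0, List.map_cons, List.filter_cons]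
            simpa [tailsB, List.filterMap_cons] using ih
          · rw [if_neg h0]
            simpa [tailsB, List.filterMap_cons] using ih
      | [a] =>
          by_cases ha : a = h <;>
            simp_all [tailsB, List.filterMap_cons, List.filter_cons, ha]
      | a :: b :: t =>
          by_cases ha : a = h <;>
            simp_all [tailsB, List.filterMap_cons, List.filter_cons, ha]

theorem sumLen_tailsB_lt (gss : List (List String)) (h : String)
    (hne : tailsB gss h ≠ []) : sumLen (tailsB gss h) < sumLen gss := by
  rw [← bucket_filter_eq_tailsB] at hne ⊢
  exact sumLen_bucket_lt _ _ hne

def PyTrie.children : PyTrie → PyTrieL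
  | .node cs => cs

-- ---- A-side trie characterisation ----

theorem insertPath_nil (t : PyTrie) : insertPath t [] = t := by cases t; simp [insertPath]

theorem children_insertPath (cs : PyTrieL) (p : String) (ps : List String) :
    (insertPath (.node cs) (p :: ps)).children = insertPathL cs p ps := by
  simp [insertPath, PyTrie.children]

theorem insertPathL_ne_nil (cs : PyTrieL) (p : String) (ps : List String) :
    insertPathL cs p ps ≠ .nil := by
  cases cs <;> simp [insertPathL] <;> split <;> simp

theorem lookupA?_insertPathL (cs : PyTrieL) (p : String) (ps : List String) (k : String) :
    lookupA? (insertPathL cs p ps) k =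
      if k = p then some (insertPath ((lookupA? cs k).getD (.node .nil)) ps)
      else lookupA? cs k := by
  match cs with
  | .nil =>
      by_cases hk : k = p
      · subst hk; simp [insertPathL, lookupA?]
      · simp [insertPathL, lookupA?, hk, Ne.symm hk]
  | .cons k' t' rest =>
      by_cases h1 : k' = p
      · subst h1
        by_cases h2 : k' = k
        · subst h2; simp [insertPathL, lookupA?]
        · simp [insertPathL, lookupA?, h2, Ne.symm h2]
      · by_cases h2 : k' = k
        · subst h2; simp [insertPathL, lookupA?, h1]
        · simp [insertPathL, lookupA?, h1, h2, lookupA?_insertPathL rest p ps k]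

theorem mem_keysA_insertPathL (cs : PyTrieL) (p : String) (ps : List String) (k : String) :
    k ∈ keysA (insertPathL cs p ps) ↔ k ∈ keysA cs ∨ k = p := by
  match cs with
  | .nil => simp [insertPathL, keysA]
  | .cons k' t' rest =>
      by_cases h1 : k' = p
      · subst h1; simp [insertPathL, keysA]; tauto
      · simp [insertPathL, keysA, h1, mem_keysA_insertPathL rest p ps k]; tauto

theorem nodup_keysA_insertPathL (cs : PyTrieL) (p : String) (ps : List String)
    (h : (keysA cs).Nodup) : (keysA (insertPathL cs p ps)).Nodup := by
  match cs with
  | .nil => simp [insertPathL, keysA]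
  | .cons k' t' rest =>
      simp only [keysA, List.nodup_cons] at h
      by_cases h1 : k' = p
      · subst h1
        simpa [insertPathL, keysA, List.nodup_cons] using h
      · simp only [insertPathL, if_neg h1, keysA, List.nodup_cons, mem_keysA_insertPathL]
        refine ⟨fun hor => ?_, nodup_keysA_insertPathL rest p ps h.2⟩
        rcases hor with h' | h'
        · exact h.1 h'
        · exact h1 h'

theorem isEmptyT_iff (t : PyTrie) : isEmptyT t = true ↔ t.children = .nil := by
  cases t with
  | node cs => cases cs <;> simp [isEmptyT, PyTrie.children]

theorem lookupA?_isSome_iff (cs : PyTrieL) (k : String) :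
    (lookupA? cs k).isSome = true ↔ k ∈ keysA cs := by
  match cs with
  | .nil => simp [lookupA?, keysA]
  | .cons k' t' rest =>
      by_cases h : k' = k <;>
        simp [lookupA?, keysA, h, lookupA?_isSome_iff rest k] <;> tauto

-- tails of the group of paths starting with k (including empty tails)
def tailsAt (qss : List (List String)) (k : String) : List (List String) :=
  qss.filterMap (fun g => match g with
    | a :: gs => if a = k then some gs else none
    | [] => none)

theorem mem_tailsAt (qss : List (List String)) (k : String) (x : List String) :
    x ∈ tailsAt qss k ↔ k :: x ∈ qss := by
  simp only [tailsAt, List.mem_filterMap]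
  constructor
  · rintro ⟨g, hg, hfg⟩
    match g with
    | [] => simp at hfg
    | a :: gs =>
        simp at hfg
        obtain ⟨ha, hgs⟩ := hfg
        subst ha; subst hgs; exact hg
  · intro h; exact ⟨k :: x, h, by simp⟩

def headsOf (qss : List (List String)) : List String := qss.filterMap List.head?

def getE (cs : PyTrieL) (k : String) : PyTrie := (lookupA? cs k).getD (.node .nil)

theorem tailsAt_cons_nil (qss : List (List String)) (k : String) :
    tailsAt ([] :: qss) k = tailsAt qss k := rfl

theorem tailsAt_cons_cons (a : String) (gs : List String) (qss : List (List String)) (k : String) :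
    tailsAt ((a :: gs) :: qss) k = if a = k then gs :: tailsAt qss k else tailsAt qss k := by
  by_cases ha : a = k <;> simp [tailsAt, ha]

theorem getE_foldl (qss : List (List String)) (t : PyTrie) (k : String) :
    getE (qss.foldl insertPath t).children k =
      (tailsAt qss k).foldl insertPath (getE t.children k) := by
  induction qss generalizing t with
  | nil => rfl
  | cons g rest ih =>
      match g with
      | [] => simpa [tailsAt_cons_nil, insertPath_nil] using ih t
      | a :: gs =>
          cases t with
          | node cs =>
            rw [List.foldl_cons, ih, tailsAt_cons_cons]
            by_cases ha : a = k
            · rw [if_pos ha, List.foldl_cons]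
              congr 1
              rw [children_insertPath]
              unfold getE
              rw [lookupA?_insertPathL, if_pos ha.symm]
              simp [PyTrie.children]
            · rw [if_neg ha]
              congr 1
              rw [children_insertPath]
              unfold getE
              rw [lookupA?_insertPathL, if_neg (fun h : k = a => ha h.symm)]
              simp [PyTrie.children]

theorem mem_keysA_foldl (qss : List (List String)) (t : PyTrie) (k : String) :
    k ∈ keysA (qss.foldl insertPath t).children ↔
      k ∈ keysA t.children ∨ k ∈ headsOf qss := by
  induction qss generalizing t with
  | nil => simp [headsOf]
  | cons g rest ih =>
      match g with
      | [] => simpa [headsOf, insertPath_nil] using ih t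
      | a :: gs =>
          cases t with
          | node cs =>
            simp only [List.foldl_cons, ih, children_insertPath, mem_keysA_insertPathL]
            simp [headsOf, List.filterMap_cons, PyTrie.children]
            tauto

theorem nodup_keysA_foldl (qss : List (List String)) (t : PyTrie)
    (h : (keysA t.children).Nodup) : (keysA (qss.foldl insertPath t).children).Nodup := by
  induction qss generalizing t with
  | nil => exact h
  | cons g rest ih =>
      match g with
      | [] => rw [List.foldl_cons, insertPath_nil]; exact ih t h
      | a :: gs =>
          cases t with
          | node cs =>
            rw [List.foldl_cons]
            exact ih _ (by rw [children_insertPath]; exact nodup_keysA_insertPathL _ _ _ h)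

theorem children_foldl_nil_iff (qss : List (List String)) (t : PyTrie) :
    (qss.foldl insertPath t).children = .nil ↔
      t.children = .nil ∧ ∀ g ∈ qss, g = [] := by
  induction qss generalizing t with
  | nil => simp
  | cons g rest ih =>
      match g with
      | [] => rw [List.foldl_cons, insertPath_nil]; simp [ih t]
      | a :: gs =>
          cases t with
          | node cs =>
            rw [List.foldl_cons, ih]
            rw [children_insertPath]
            simp [insertPathL_ne_nil]

theorem foldl_insertPath_filter (qss : List (List String)) (t : PyTrie) :
    (qss.filter (fun g => !g.isEmpty)).foldl insertPath t = qss.foldl insertPath t := by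
  induction qss generalizing t with
  | nil => rfl
  | cons g rest ih =>
      match g with
      | [] => simp [insertPath_nil, ih]
      | a :: gs => simp [ih]

-- ---- B-side group characterisation ----

theorem mem_tailsB (gss : List (List String)) (k : String) (x : List String) :
    x ∈ tailsB gss k ↔ k :: x ∈ gss ∧ x ≠ [] := by
  simp only [tailsB, List.mem_filterMap]
  constructor
  · rintro ⟨g, hg, hfg⟩
    match g with
    | [] => simp at hfg
    | [a] => simp at hfg
    | a :: b :: ts =>
        simp at hfg
        obtain ⟨ha, hx⟩ := hfg
        subst ha; subst hx; exact ⟨hg, by simp⟩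
  · rintro ⟨hmem, hne⟩
    match x, hne with
    | b :: ts, _ => exact ⟨k :: b :: ts, hmem, by simp⟩

theorem tailsB_eq_nil_iff (gss : List (List String)) (k : String) :
    tailsB gss k = [] ↔ ∀ x, k :: x ∈ gss → x = [] := by
  constructor
  · intro h x hx
    by_contra hne
    have : x ∈ tailsB gss k := (mem_tailsB gss k x).mpr ⟨hx, hne⟩
    simp [h] at this
  · intro h
    by_contra hne
    obtain ⟨x, hx⟩ := List.exists_mem_of_ne_nil _ hne
    obtain ⟨hmem, hxne⟩ := (mem_tailsB gss k x).mp hx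
    exact hxne (h x hmem)

theorem mem_heads_map (pss : List (List String)) (hne : ∀ g ∈ pss, g ≠ []) (y : String) :
    y ∈ pss.map (fun g => g.headD "") ↔ ∃ t, y :: t ∈ pss := by
  simp only [List.mem_map]
  constructor
  · rintro ⟨g, hg, hy⟩
    match g, hne g hg with
    | a :: t, _ => exact ⟨t, by simpa [← hy] using hg⟩
  · rintro ⟨t, ht⟩
    exact ⟨y :: t, ht, rfl⟩

theorem mem_headsOf (qss : List (List String)) (y : String) :
    y ∈ headsOf qss ↔ ∃ t, y :: t ∈ qss := by
  simp only [headsOf, List.mem_filterMap]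
  constructor
  · rintro ⟨g, hg, hy⟩
    match g with
    | [] => simp at hy
    | a :: t => simp at hy; subst hy; exact ⟨t, hg⟩
  · rintro ⟨t, ht⟩; exact ⟨y :: t, ht, rfl⟩

theorem sorted_eq_of_nodup_mem (xs ys : List String)
    (h1 : xs.Nodup) (h2 : ys.Nodup) (h : ∀ a, a ∈ xs ↔ a ∈ ys) :
    PySem.List.sorted xs (fun x => x) false = PySem.List.sorted ys (fun x => x) false :=
  PySem.List.sorted_eq_sorted_of_perm xs ys _ (fun _ _ hab => hab)
    ((List.perm_ext_iff_of_nodup h1 h2).mpr h)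


theorem walkA_eq (t : PyTrie) (pre : String) :
    walkA t pre =
      walkKeysA t.children (PySem.List.sorted (keysA t.children) (fun x => x) false) 0
        (PySem.List.sorted (keysA t.children) (fun x => x) false).length pre := by
  cases t with
  | node cs => rw [walkA]; rfl

theorem keys_bucketsOf (gss : List (List String)) :
    (bucketsOf gss).keys = PySem.Set.ofList (gss.map (fun g => g.headD "")) := by
  rw [bucketsOf, ← List.foldl_map (f := fun g : List String => ((g.headD "" : String), g.tail))
        (g := fun d p => PySem.Dict.modify d p.1 [] (fun b => b ++ [p.2]))]
  have hk := PySem.Dict.keys_foldl_modify_key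
    (l := gss.map (fun g => ((g.headD "" : String), g.tail)))
    (key := Prod.fst) (d0 := ([] : List (List String)))
    (f := fun _ p b => b ++ [p.2]) (d := PySem.Dict.empty)
  rw [List.map_map] at hk
  have h2 : (List.map (Prod.fst ∘ fun g => ((g.headD "" : String), g.tail)) gss)
      = List.map (fun g => (g.headD "" : String)) gss := by simp [Function.comp_def]
  rw [h2] at hk
  exact hk.trans (by rw [PySem.Set.ofList_eq_foldl]; rfl)

theorem walkB_eq (gss : List (List String)) (pre : String) :
    walkB gss pre =
      walkHeadsB gss
        (PySem.List.sorted (PySem.Set.ofList (gss.map (fun g => g.headD ""))) (fun x => x) false) 0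
        (PySem.List.sorted (PySem.Set.ofList (gss.map (fun g => g.headD ""))) (fun x => x) false).length
        pre := by
  rw [walkB, keys_bucketsOf]

theorem main_walk : ∀ (n : Nat) (qss pss : List (List String)) (pre : String),
    sumLen pss ≤ n → (∀ g, g ∈ qss ↔ g ∈ pss) → (∀ g ∈ pss, g ≠ []) →
    walkA (qss.foldl insertPath (.node .nil)) pre = walkB pss pre := by
  intro n
  induction n using Nat.strong_induction_on with
  | _ n IH =>
  intro qss pss pre hn hmem hne
  have hkeysmem : ∀ k, k ∈ keysA (qss.foldl insertPath (.node .nil)).children ↔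
      ∃ t, k :: t ∈ pss := by
    intro k
    rw [mem_keysA_foldl, mem_headsOf]
    simp only [PyTrie.children, keysA, List.not_mem_nil, false_or]
    exact ⟨fun ⟨t, ht⟩ => ⟨t, (hmem _).mp ht⟩, fun ⟨t, ht⟩ => ⟨t, (hmem _).mpr ht⟩⟩
  have hnodup : (keysA (qss.foldl insertPath (.node .nil)).children).Nodup :=
    nodup_keysA_foldl qss (.node .nil) (by simp [keysA, PyTrie.children])
  have hBmem : ∀ y, y ∈ PySem.Set.ofList (pss.map (fun g => g.headD "")) ↔
      ∃ t, y :: t ∈ pss := by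
    intro y
    rw [PySem.Set.mem_ofList, mem_heads_map pss hne]
  have hsorted :
      PySem.List.sorted (PySem.Set.ofList (pss.map (fun g => g.headD ""))) (fun x => x) false =
        PySem.List.sorted (keysA (qss.foldl insertPath (.node .nil)).children) (fun x => x) false :=
    sorted_eq_of_nodup_mem _ _ (PySem.Set.nodup_ofList (pss.map (fun g => g.headD ""))) hnodup
      (fun a => (hBmem a).trans (hkeysmem a).symm)
  rw [walkA_eq, walkB_eq, hsorted]
  have step : ∀ ks : List String,
      (∀ k ∈ ks, k ∈ keysA (qss.foldl insertPath (.node .nil)).children) →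
      ∀ (i total : Nat) (pre' : String),
      walkKeysA (qss.foldl insertPath (.node .nil)).children ks i total pre' =
        walkHeadsB pss ks i total pre' := by
    intro ks
    induction ks with
    | nil => intro _ i total pre'; rw [walkKeysA, walkHeadsB]
    | cons k rest ihks =>
      intro hks i total pre'
      have hkmem : k ∈ keysA (qss.foldl insertPath (.node .nil)).children :=
        hks k (List.mem_cons_self ..)
      have htail := ihks (fun k' hk' => hks k' (List.mem_cons_of_mem _ hk')) (i + 1) total pre'
      rw [walkKeysA, walkHeadsB]
      simp only [bucket_filter_eq_tailsB]
      split
      case _ heq =>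
        exfalso
        have hs := (lookupA?_isSome_iff _ _).mpr hkmem
        rw [heq] at hs
        simp at hs
      case _ child hchild =>
      have hchildval : child = (tailsAt qss k).foldl insertPath (.node .nil) := by
        have h2 := getE_foldl qss (.node .nil) k
        unfold getE at h2
        rw [hchild] at h2
        simpa [PyTrie.children, lookupA?] using h2
      have hconn : isEmptyT child = true ↔ tailsB pss k = [] := by
        rw [isEmptyT_iff, hchildval, children_foldl_nil_iff, tailsB_eq_nil_iff]
        simp only [PyTrie.children, true_and]
        constructor
        · intro h x hx
          exact h x ((mem_tailsAt qss k x).mpr ((hmem _).mpr hx))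
        · intro h g hg
          exact h g ((hmem _).mp ((mem_tailsAt qss k g).mp hg))
      by_cases hempty : tailsB pss k = []
      · have hA : isEmptyT child = true := hconn.mpr hempty
        simp only [hA, if_true, dif_pos hempty, htail]
      · have hA : isEmptyT child = false := by
          rcases Bool.eq_false_or_eq_true (isEmptyT child) with h | h
          · exact absurd (hconn.mp h) hempty
          · exact h
        have hrec : walkA child (pre' ++ (if (i == total - 1) then "    " else "│   ")) =
            walkB (tailsB pss k) (pre' ++ (if (i == total - 1) then "    " else "│   ")) := by
          rw [hchildval, ← foldl_insertPath_filter]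
          refine IH (sumLen (tailsB pss k))
            (Nat.lt_of_lt_of_le (sumLen_tailsB_lt pss k hempty) hn) _ _ _ (Nat.le_refl _) ?_ ?_
          · intro g
            simp only [List.mem_filter, mem_tailsAt, mem_tailsB, Bool.not_true,
              Bool.not_eq_eq_eq_not, List.isEmpty_eq_false_iff, ne_eq]
            rw [hmem (k :: g)]
          · intro g hg
            exact ((mem_tailsB pss k g).mp hg).2
        simp only [hA, dif_neg hempty, htail, hrec]
        simp
  exact step _ (fun k hk => (PySem.List.mem_sorted _ _ _ _).mp hk) 0 _ pre

theorem splitOn_go_ne_nil (sep : List Char) :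
    ∀ (fuel : Nat) (l cur : List Char) (acc : List (List Char)),
    PySem.Chars.splitOn.go sep fuel l cur acc ≠ [] := by
  intro fuel
  induction fuel with
  | zero => intro l cur acc; simp [PySem.Chars.splitOn.go]
  | succ fuel ih =>
      intro l cur acc
      match l with
      | [] => simp [PySem.Chars.splitOn.go]
      | c :: rest =>
          rw [PySem.Chars.splitOn.go]
          split
          · exact ih _ _ _
          · exact ih _ _ _

theorem splitParts_ne_nil (p : String) : splitParts p ≠ [] := by
  rw [splitParts, PySem.Str.split?, PySem.Chars.split?]
  simp
  intro h
  exact absurd h (by rw [PySem.Chars.splitOn]; exact splitOn_go_ne_nil _ _ _ _ _)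

-- ===== VERDICT (by name: the statement is the Claim_ definition above) =====
theorem generate_ascii_tree_spec : Claim_equal_generate_ascii_tree := by
  intro file_paths _
  unfold Spec_generate_ascii_tree generate_ascii_tree generate_ascii_tree_alt buildTrie
  congr 1
  congr 1
  rw [← List.foldl_map (f := splitParts) (g := insertPath)]
  refine main_walk (sumLen (file_paths.map splitParts)) _ _ _ (Nat.le_refl _) ?_ ?_
  · intro g
    exact ((PySem.List.sorted_perm file_paths (fun x => x) false).map splitParts).mem_iff
  · intro g hg
    obtain ⟨p, _, hp⟩ := List.mem_map.mp hg
    rw [← hp]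
    exact splitParts_ne_nil p
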